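-- pv_equiv track=rewrite | github.com/mtotho/spindrel | app/services/api_keys.py | has_scope
-- ===== SOURCE A (Python) =====
-- def _parse_scope(scope: str) -> tuple[str, str]:
--     """Parse scope into (resource, action). Handles 'resource:action' and 'resource.sub:action'."""
--     parts = scope.split(":")
--     if len(parts) >= 2:
--         return parts[0], parts[1]
--     return scope, ""
--
-- def has_scope(key_scopes: list[str], required: str) -> bool:
--     """Check if key_scopes satisfy the required scope.
--
--     Rules:
--     - 'admin' bypasses all checks
--     - Exact match always works
--     - Write implies read (e.g. 'channels:write' grants 'channels:read')
--     - Parent resource covers child (e.g. 'channels:write' covers 'channels.messages:write')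
--     - Broader scopes cover narrower (e.g. 'channels:write' covers 'channels:write:abc123')
--     - Wildcard: 'channels:*' covers any 'channels:action'
--
--     Scope format: <resource>[.sub]:action[:<resource_id>]
--     Examples:
--         'channels:read'               — read all channels
--         'channels.messages:write'     — inject messages only
--         'channels:write'              — all channel write ops (covers channels.messages:write)
--         'channels:read:abc123'        — read specific channel (future)
--         'channels:*'                  — all channel actions
--     """
--     if "admin" in key_scopes:
--         return True
--     if required in key_scopes:
--         return True
--
--     req_resource, req_action = _parse_scope(required)
--
--     for s in key_scopes:
--         s_resource, s_action = _parse_scope(s)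
--
--         # Write implies read (same resource)
--         if req_action == "read" and s_action == "write" and req_resource == s_resource:
--             return True
--
--         # Parent resource covers child: 'channels:write' covers 'channels.messages:write'
--         if req_resource.startswith(s_resource + "."):
--             if s_action == req_action:
--                 return True
--             if s_action == "write" and req_action == "read":
--                 return True
--
--         # Broader scope covers narrower: 'channels:write' covers 'channels:write:abc123'
--         if required.startswith(s + ":"):
--             return True
--
--         # Wildcard: 'channels:*' covers 'channels:read', 'channels.messages:write', etc.
--         if s_action == "*" and (req_resource == s_resource or req_resource.startswith(s_resource + ".")):
--             return True
--
--     return False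
-- ===== SOURCE B (Python) =====
-- def _parse_scope(scope: str) -> tuple[str, str]:
--     parts = scope.split(":")
--     if len(parts) >= 2:
--         return parts[0], parts[1]
--     return scope, ""
--
-- def _prefixes_before(s: str, ch: str) -> list[str]:
--     """All prefixes p of s with s.startswith(p + ch)."""
--     return [s[:i] for i, c in enumerate(s) if c == ch]
--
-- def has_scope(key_scopes: list[str], required: str) -> bool:
--     raw = set(key_scopes)
--     pairs = {_parse_scope(s) for s in key_scopes}
--     if "admin" in raw or required in raw:
--         return True
--     # broader-covers-narrower: any colon-delimited prefix of `required` held verbatim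
--     if any(p in raw for p in _prefixes_before(required, ":")):
--         return True
--     rr, ra = _parse_scope(required)
--     ancestors = _prefixes_before(rr, ".")
--     cands = (
--         [(rr, "*")]
--         + ([(rr, "write")] if ra == "read" else [])
--         + [c for a in ancestors
--              for c in [(a, ra), (a, "*")] + ([(a, "write")] if ra == "read" else [])]
--     )
--     return any(c in pairs for c in cands)
-- ===== Notes on version B (the rewrite author's own statement) =====
-- stated objective: alternative
-- what changed: Instead of scanning key_scopes and testing five rule conditions per stored scope, B precomputes a set of raw scope strings and a set of parsed (resource,action) pairs once, derives from `required` alone the finite list of covering candidates (admin/exact, colon-delimited prefixes, write-implies-read, dotted ancestors, wildcards) and answers by set membership.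
import Mathlib
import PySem

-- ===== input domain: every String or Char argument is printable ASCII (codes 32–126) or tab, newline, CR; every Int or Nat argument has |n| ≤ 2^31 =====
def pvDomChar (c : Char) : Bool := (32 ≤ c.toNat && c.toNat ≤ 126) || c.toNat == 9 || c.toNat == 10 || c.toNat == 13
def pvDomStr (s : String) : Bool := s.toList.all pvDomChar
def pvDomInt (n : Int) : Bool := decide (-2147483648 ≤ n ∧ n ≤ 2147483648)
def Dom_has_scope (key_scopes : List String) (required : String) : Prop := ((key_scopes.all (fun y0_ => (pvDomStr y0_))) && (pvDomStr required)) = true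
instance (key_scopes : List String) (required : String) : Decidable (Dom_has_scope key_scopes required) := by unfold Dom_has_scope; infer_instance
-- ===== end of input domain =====

-- B replaces A's per-stored-scope rule scan by one precomputed set of raw scopes plus one set of
-- parsed (resource, action) pairs, and derives the covering candidates from `required` alone
-- (alternative decomposition; not claimed faster).

-- ===== PORT A =====
-- _parse_scope, shared module helper of both versions
def parseScope (scope : String) : String × String :=
  match PySem.Str.split? scope ":" with
  | some (p0 :: p1 :: _) => (p0, p1)
  | _ => (scope, "")

-- the `for s in key_scopes:` loop of A, with its early returns
def hasScopeLoop (required rr ra : String) : List String → Bool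
  | [] => false
  | s :: rest =>
    let p := parseScope s
    if ra == "read" && p.2 == "write" && rr == p.1 then true
    else if PySem.Str.startswith rr (p.1 ++ ".") && p.2 == ra then true
    else if PySem.Str.startswith rr (p.1 ++ ".") && p.2 == "write" && ra == "read" then true
    else if PySem.Str.startswith required (s ++ ":") then true
    else if p.2 == "*" && (rr == p.1 || PySem.Str.startswith rr (p.1 ++ ".")) then true
    else hasScopeLoop required rr ra rest

def has_scope (key_scopes : List String) (required : String) : Bool :=
  if key_scopes.contains "admin" then true
  else if key_scopes.contains required then true
  else
    let q := parseScope required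
    hasScopeLoop required q.1 q.2 key_scopes

-- ===== PORT B =====
-- _prefixes_before of Source B: [s[:i] for i, c in enumerate(s) if c == ch] (filterMap = comprehension with filter)
def prefixesBefore (s : List Char) (ch : Char) : List (List Char) :=
  (PySem.List.enumerate s).filterMap
    (fun ic => if ic.2 = ch then some (PySem.List.slice s none (some ic.1)) else none)

def prefixesBeforeStr (s : String) (ch : Char) : List String :=
  (prefixesBefore s.toList ch).map String.ofList

def has_scope_alt (key_scopes : List String) (required : String) : Bool :=
  let raw : PySem.Set String := PySem.Set.ofList key_scopes
  let pairs : PySem.Set (String × String) := PySem.Set.ofList (key_scopes.map parseScope)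
  if PySem.Set.contains raw "admin" || PySem.Set.contains raw required then true
  else if (prefixesBeforeStr required ':').any (fun p => PySem.Set.contains raw p) then true
  else
    let q := parseScope required
    let ancestors := prefixesBeforeStr q.1 '.'
    let cands : List (String × String) :=
      [(q.1, "*")] ++ (if q.2 == "read" then [(q.1, "write")] else [])
        ++ ancestors.flatMap (fun a =>
             [(a, q.2), (a, "*")] ++ (if q.2 == "read" then [(a, "write")] else []))
    cands.any (fun c => PySem.Set.contains pairs c)

-- ===== PRECONDITION & SPEC =====
def Spec_has_scope (key_scopes : List String) (required : String) (out : Bool) : Prop := out = has_scope_alt key_scopes required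
instance (key_scopes : List String) (required : String) (out : Bool) : Decidable (Spec_has_scope key_scopes required out) := by unfold Spec_has_scope; infer_instance

-- ===== CLAIM (what is proved, stated in full; the proofs are below) =====
def Claim_equal_has_scope : Prop := ∀ (key_scopes : List String) (required : String), Dom_has_scope key_scopes required → Spec_has_scope key_scopes required (has_scope key_scopes required)

-- ===== LEMMAS AND PROOFS =====

theorem mem_prefixesBefore {ch : Char} {l p : List Char} :
    p ∈ prefixesBefore l ch ↔ p ++ [ch] <+: l := by
  simp only [prefixesBefore, List.mem_filterMap, Option.ite_none_right_eq_some, Option.some.injEq]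
  constructor
  · rintro ⟨ic, hmem, hch, rfl⟩
    rcases (PySem.List.mem_enumerate_iff l 0 ic).mp hmem with ⟨k, hk, rfl⟩
    simp only at hch ⊢
    rw [PySem.List.slice_to l (by omega)]
    have : ((0 + (k : Int)).toNat) = k := by omega
    rw [this]
    have htake : l.take k ++ [l[k]] <+: l := by
      have := List.take_prefix (k + 1) l
      rwa [List.take_add_one, List.getElem?_eq_getElem hk] at this
    rwa [hch] at htake
  · intro h
    have hlen : p.length + 1 ≤ l.length := by
      have := h.length_le
      simpa using this
    have hk : p.length < l.length := by omega
    refine ⟨((p.length : Int), l[p.length]), (PySem.List.mem_enumerate_iff l 0 _).mpr ⟨p.length, hk, by simp⟩, ?_, ?_⟩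
    · have := h.getElem (i := p.length) (by simp)
      simpa using this.symm
    · rw [PySem.List.slice_to l (by omega)]
      have hp : p <+: l := (List.prefix_append p [ch]).trans h
      have := List.prefix_iff_eq_take.mp hp
      simpa using this.symm

theorem mem_prefixesBeforeStr {s t : String} {ch : Char} :
    s ∈ prefixesBeforeStr t ch ↔ (s.toList ++ [ch]) <+: t.toList := by
  constructor
  · rintro h
    simp only [prefixesBeforeStr, List.mem_map] at h
    obtain ⟨l, hl, rfl⟩ := h
    simpa [String.toList_ofList] using mem_prefixesBefore.mp hl
  · intro h
    simp only [prefixesBeforeStr, List.mem_map]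
    exact ⟨s.toList, mem_prefixesBefore.mpr h, by simp⟩

theorem startswith_mem (t s : String) (ch : Char) :
    PySem.Chars.startswith t.toList (s.toList ++ [ch]) = true ↔ s ∈ prefixesBeforeStr t ch := by
  rw [mem_prefixesBeforeStr, PySem.Chars.startswith_iff]

theorem if_bool_true_or (b e : Bool) : (if b = true then true else e) = (b || e) := by
  cases b <;> simp

theorem hasScopeLoop_eq_any (required rr ra : String) (l : List String) :
    hasScopeLoop required rr ra l =
      l.any (fun s =>
        let p := parseScope s
        (ra == "read" && p.2 == "write" && rr == p.1) ||
        (PySem.Str.startswith rr (p.1 ++ ".") && p.2 == ra) ||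
        (PySem.Str.startswith rr (p.1 ++ ".") && p.2 == "write" && ra == "read") ||
        PySem.Str.startswith required (s ++ ":") ||
        (p.2 == "*" && (rr == p.1 || PySem.Str.startswith rr (p.1 ++ ".")))) := by
  induction l with
  | nil => rfl
  | cons s rest ih =>
    simp only [hasScopeLoop, List.any_cons, ih, if_bool_true_or, Bool.or_assoc]

theorem setContains_ofList {α : Type} [BEq α] [LawfulBEq α] (xs : List α) (x : α) :
    PySem.Set.contains (PySem.Set.ofList xs) x = xs.contains x := by
  rw [Bool.eq_iff_iff]
  rw [PySem.Set.contains_iff, PySem.Set.mem_ofList, List.contains_iff_mem]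

theorem match_iff (required rr ra s : String) :
    ((ra == "read" && (parseScope s).2 == "write" && rr == (parseScope s).1 ||
      (PySem.Str.startswith rr ((parseScope s).1 ++ ".") && (parseScope s).2 == ra) ||
      (PySem.Str.startswith rr ((parseScope s).1 ++ ".") && (parseScope s).2 == "write" && ra == "read") ||
      PySem.Str.startswith required (s ++ ":") ||
      ((parseScope s).2 == "*" && (rr == (parseScope s).1 || PySem.Str.startswith rr ((parseScope s).1 ++ ".")))) = true) ↔
    (s ∈ prefixesBeforeStr required ':' ∨
      parseScope s ∈ ([(rr, "*")] ++ (if ra == "read" then [(rr, "write")] else [])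
        ++ (prefixesBeforeStr rr '.').flatMap (fun a =>
             [(a, ra), (a, "*")] ++ (if ra == "read" then [(a, "write")] else [])))) := by
  rcases hp : parseScope s with ⟨sr, sa⟩
  simp only [Bool.or_eq_true, Bool.and_eq_true, beq_iff_eq,
    PySem.Str.startswith_eq, String.toList_append, List.mem_append, List.mem_flatMap,
    List.mem_cons, List.not_mem_nil, Prod.mk.injEq, or_false]
  rw [show (".".toList) = ['.'] from rfl, show (":".toList) = [':'] from rfl]
  rw [startswith_mem required s ':', startswith_mem rr sr '.']
  by_cases hra : ra = "read" <;> simp [hra, ← and_or_left] <;> aesop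

theorem any_match (key_scopes : List String) (required rr ra : String) :
    (key_scopes.any (fun s =>
        (ra == "read" && (parseScope s).2 == "write" && rr == (parseScope s).1 ||
         (PySem.Str.startswith rr ((parseScope s).1 ++ ".") && (parseScope s).2 == ra) ||
         (PySem.Str.startswith rr ((parseScope s).1 ++ ".") && (parseScope s).2 == "write" && ra == "read") ||
         PySem.Str.startswith required (s ++ ":") ||
         ((parseScope s).2 == "*" && (rr == (parseScope s).1 || PySem.Str.startswith rr ((parseScope s).1 ++ ".")))))) =
    ((prefixesBeforeStr required ':').any (fun p => key_scopes.contains p) ||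
     ([(rr, "*")] ++ (if ra == "read" then [(rr, "write")] else [])
        ++ (prefixesBeforeStr rr '.').flatMap (fun a =>
             [(a, ra), (a, "*")] ++ (if ra == "read" then [(a, "write")] else []))).any
       (fun c => (key_scopes.map parseScope).contains c)) := by
  rw [Bool.eq_iff_iff, Bool.or_eq_true]
  simp only [List.any_eq_true, List.contains_iff_mem]
  constructor
  · rintro ⟨s, hs, h⟩
    rcases (match_iff required rr ra s).mp (by simpa using h) with h' | h'
    · exact Or.inl ⟨s, h', hs⟩
    · exact Or.inr ⟨parseScope s, h', List.mem_map.mpr ⟨s, hs, rfl⟩⟩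
  · rintro (⟨p, hp, hpk⟩ | ⟨c, hc, hck⟩)
    · exact ⟨p, hpk, (match_iff required rr ra p).mpr (Or.inl hp)⟩
    · rcases List.mem_map.mp hck with ⟨s, hs, rfl⟩
      exact ⟨s, hs, (match_iff required rr ra s).mpr (Or.inr hc)⟩

theorem has_scope_eq (key_scopes : List String) (required : String) :
    has_scope key_scopes required = has_scope_alt key_scopes required := by
  unfold has_scope has_scope_alt
  simp only [if_bool_true_or, setContains_ofList, Bool.or_assoc]
  rw [(hasScopeLoop_eq_any required (parseScope required).1 (parseScope required).2 key_scopes).trans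
      (any_match key_scopes required (parseScope required).1 (parseScope required).2)]

-- ===== VERDICT (by name: the statement is the Claim_ definition above) =====
theorem has_scope_spec : Claim_equal_has_scope := by
  intro ks req _
  unfold Spec_has_scope
  exact has_scope_eq ks req
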